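-- pv_equiv track=rewrite | github.com/lilacstella/replicate_alpha_regex | benchmarks_runner.py | read_benchmark
-- ===== SOURCE A (Python) =====
-- import itertools
--
-- def replace_x_with_permutations(line):
--     """
--     Replace all X's in a line with all possible permutations of 0 and 1, to expand the examples specified with wildcards
--     :param line: a line from the benchmarks
--     :return: a list of all possible permutations of the line
--     """
--     count_x = line.count('X')
--     permutations = itertools.product('01', repeat=count_x)
--     results = []
--
--     for perm in permutations:
--         new_line = list(line)
--         perm_index = 0
--         for i, char in enumerate(new_line):
--             if char == 'X':
--                 new_line[i] = perm[perm_index]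
--                 perm_index += 1
--         results.append(''.join(new_line))
--
--     return results
--
-- def read_benchmark(content):
--     """
--     Read the content of a benchmark file and return the name, positive and negative examples
--     :param content: Benchmark file contents as a string in the format of the problem
--     :return: Python variables of the inputs to a regex generation problem
--     """
--     lines = content.splitlines()
--     name = lines[0]
--     p = []
--     n = []
--     currently_positive = True
--     for line in lines[1:]:
--         if line == "++":
--             currently_positive = True
--         elif line == "--":
--             currently_positive = False
--         elif currently_positive:
--             p.append(line)
--         else:
--             for perm in replace_x_with_permutations(line):
--                 n.append(perm)
--     return name, p, n
-- ===== SOURCE B (Python) =====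
-- def _expand(line):
--     if not line:
--         return ['']
--     head, rest = line[0], line[1:]
--     tails = _expand(rest)
--     if head == 'X':
--         return ['0' + t for t in tails] + ['1' + t for t in tails]
--     return [head + t for t in tails]
--
-- def read_benchmark(content):
--     lines = content.splitlines()
--     name = lines[0]
--     p, n = _collect(lines[1:], True)
--     return name, p, n
--
-- def _collect(lines, positive):
--     if not lines:
--         return [], []
--     line, rest = lines[0], lines[1:]
--     if line == "++":
--         return _collect(rest, True)
--     if line == "--":
--         return _collect(rest, False)
--     p, n = _collect(rest, positive)
--     if positive:
--         return [line] + p, n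
--     return p, _expand(line) + n
-- ===== Notes on version B (the rewrite author's own statement) =====
-- stated objective: alternative
-- what changed: Wildcard expansion is a structural recursion on the string (first char: branch '0'/'1' on 'X' and prepend) instead of itertools.product over the X-count plus a per-permutation list rebuild, and the parse loop is a recursion returning the (p, n) pair instead of a stateful for-loop with a mutable flag.
import Mathlib
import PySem

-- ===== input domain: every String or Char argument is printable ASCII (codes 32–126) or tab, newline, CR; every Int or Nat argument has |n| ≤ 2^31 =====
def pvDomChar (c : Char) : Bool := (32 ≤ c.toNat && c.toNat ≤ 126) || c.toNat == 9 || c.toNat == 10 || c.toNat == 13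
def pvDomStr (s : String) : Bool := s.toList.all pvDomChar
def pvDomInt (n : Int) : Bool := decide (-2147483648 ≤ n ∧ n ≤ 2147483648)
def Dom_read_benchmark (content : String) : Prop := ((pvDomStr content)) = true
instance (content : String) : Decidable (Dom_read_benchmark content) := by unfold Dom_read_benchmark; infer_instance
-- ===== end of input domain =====

-- B replaces itertools.product-based wildcard expansion by a structural recursion on the
-- string and the stateful parse loop by a recursion returning the (p, n) pair (objective: alternative).

-- ===== PORT A =====
-- itertools.product('01', repeat=k), as the standard list of k-tuples (last position fastest)
def pvProdA : Nat → List (List Char)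
  | 0 => [[]]
  | k + 1 => ((pvProdA k).map (fun r => '0' :: r)) ++ ((pvProdA k).map (fun r => '1' :: r))

-- the inner 'for i, char in enumerate(new_line)' replacement loop: consume one perm entry per 'X'
-- (the default 'X' on an exhausted perm is unreachable: perm has exactly one entry per 'X')
def pvFillA : List Char → List Char → List Char
  | [], _ => []
  | c :: cs, perm =>
    if c == 'X' then perm.headD 'X' :: pvFillA cs perm.tail
    else c :: pvFillA cs perm

def replace_x_with_permutations (line : String) : List String :=
  let permutations := pvProdA (PySem.Str.count line "X")
  permutations.foldl (fun results perm => results ++ [String.ofList (pvFillA line.toList perm)]) []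

def read_benchmark (content : String) : String × List String × List String :=
  match PySem.Str.splitlines content with
  | [] => ("", [], [])   -- unreachable under Pre_: Python raises IndexError on lines[0]
  | name :: rest =>
    let st := rest.foldl
      (fun (st : List String × List String × Bool) line =>
        if line == "++" then (st.1, st.2.1, true)
        else if line == "--" then (st.1, st.2.1, false)
        else if st.2.2 then (st.1 ++ [line], st.2.1, st.2.2)
        else (st.1,
          (replace_x_with_permutations line).foldl (fun n perm => n ++ [perm]) st.2.1,
          st.2.2))
      ([], [], true)
    (name, st.1, st.2.1)

-- ===== PORT B =====
-- Source B's _expand: recursion on the first character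
def pvExpandB : List Char → List (List Char)
  | [] => [[]]
  | c :: rest =>
    let tails := pvExpandB rest
    if c == 'X' then tails.map (fun t => '0' :: t) ++ tails.map (fun t => '1' :: t)
    else tails.map (fun t => c :: t)

-- Source B's _collect: recursion on the remaining lines, returning the (p, n) pair
def pvCollectB : List String → Bool → List String × List String
  | [], _ => ([], [])
  | line :: rest, positive =>
    if line == "++" then pvCollectB rest true
    else if line == "--" then pvCollectB rest false
    else
      let pn := pvCollectB rest positive
      if positive then (line :: pn.1, pn.2)
      else (pn.1, (pvExpandB line.toList).map String.ofList ++ pn.2)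

def read_benchmark_alt (content : String) : String × List String × List String :=
  match PySem.Str.splitlines content with
  | [] => ("", [], [])   -- unreachable under Pre_: Python raises IndexError on lines[0]
  | name :: rest =>
    let pn := pvCollectB rest true
    (name, pn.1, pn.2)

-- ===== PRECONDITION & SPEC =====
-- Pre_ excludes only the empty string, on which A (and B) raise IndexError at lines[0].
def Pre_read_benchmark (content : String) : Prop := content ≠ ""
instance (content : String) : Decidable (Pre_read_benchmark content) := by unfold Pre_read_benchmark; infer_instance
def pvWitness_read_benchmark : String := "name\na\n--\naXb"

def Spec_read_benchmark (content : String) (out : String × List String × List String) : Prop := out = read_benchmark_alt content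
instance (content : String) (out : String × List String × List String) : Decidable (Spec_read_benchmark content out) := by unfold Spec_read_benchmark; infer_instance

-- ===== CLAIM (what is proved, stated in full; the proofs are below) =====
def Claim_equal_read_benchmark : Prop := ∀ (content : String), Dom_read_benchmark content → Pre_read_benchmark content → Spec_read_benchmark content (read_benchmark content)

-- ===== LEMMAS AND PROOFS =====

-- Chars.count with the single-character pattern ['X'] is plain character counting
theorem count_go_single (fuel : Nat) (l : List Char) (acc : Nat) (h : l.length ≤ fuel) :
    PySem.Chars.count.go ['X'] fuel l acc = acc + l.count 'X' := by
  induction fuel generalizing l acc with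
  | zero =>
    have : l = [] := by cases l <;> simp_all
    subst this; simp [PySem.Chars.count.go]
  | succ k ih =>
    cases l with
    | nil => simp [PySem.Chars.count.go]
    | cons c cs =>
      by_cases hc : c = 'X'
      · subst hc
        simp only [PySem.Chars.count.go, List.isPrefixOf, BEq.rfl, Bool.true_and, if_pos]
        rw [ih]
        · simp; omega
        · simpa using Nat.le_of_succ_le_succ (by simpa using h)
      · have hbe : (['X'].isPrefixOf (c :: cs)) = false := by
          simp [List.isPrefixOf]; exact fun h' => hc (by simpa using h'.symm)
        simp only [PySem.Chars.count.go, hbe, if_neg, Bool.false_eq_true, not_false_iff]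
        rw [ih]
        · simp [hc]
        · simpa using Nat.le_of_succ_le_succ (by simpa using h)

theorem count_single (cs : List Char) : PySem.Chars.count cs ['X'] = cs.count 'X' := by
  simp [PySem.Chars.count]
  simpa using count_go_single cs.length cs 0 le_rfl

-- A's product-then-fill equals B's structural recursion
theorem prod_fill_eq_expand (cs : List Char) :
    (pvProdA (cs.count 'X')).map (pvFillA cs) = pvExpandB cs := by
  induction cs with
  | nil => simp [pvProdA, pvFillA, pvExpandB]
  | cons c cs ih =>
    by_cases hc : c = 'X'
    · subst hc
      simp only [List.count_cons_self, pvProdA, pvExpandB, List.map_append, List.map_map, ← ih]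
      simp [pvFillA, Function.comp_def]
    · have : (c :: cs).count 'X' = cs.count 'X' := by simp [hc]
      rw [this]
      simp only [pvExpandB, ← ih, List.map_map]
      rw [if_neg (by simp [hc])]
      apply List.map_congr_left
      intro perm _
      simp [pvFillA, hc]

theorem replace_eq_expand (line : String) :
    replace_x_with_permutations line = (pvExpandB line.toList).map String.ofList := by
  unfold replace_x_with_permutations
  rw [PySem.List.foldl_append_singleton_eq_map]
  have hc : PySem.Str.count line "X" = line.toList.count 'X' := by
    simp [PySem.Str.count, count_single]
  rw [hc, ← prod_fill_eq_expand, List.map_map]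
  rfl

-- A's stateful line loop equals B's recursion on the line list
theorem loop_eq_collect (lines : List String) (p n : List String) (cur : Bool) :
    (lines.foldl
      (fun (st : List String × List String × Bool) line =>
        if line == "++" then (st.1, st.2.1, true)
        else if line == "--" then (st.1, st.2.1, false)
        else if st.2.2 then (st.1 ++ [line], st.2.1, st.2.2)
        else (st.1,
          (replace_x_with_permutations line).foldl (fun n perm => n ++ [perm]) st.2.1,
          st.2.2))
      (p, n, cur)).1 = p ++ (pvCollectB lines cur).1 ∧
    (lines.foldl
      (fun (st : List String × List String × Bool) line =>
        if line == "++" then (st.1, st.2.1, true)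
        else if line == "--" then (st.1, st.2.1, false)
        else if st.2.2 then (st.1 ++ [line], st.2.1, st.2.2)
        else (st.1,
          (replace_x_with_permutations line).foldl (fun n perm => n ++ [perm]) st.2.1,
          st.2.2))
      (p, n, cur)).2.1 = n ++ (pvCollectB lines cur).2 := by
  induction lines generalizing p n cur with
  | nil => simp [pvCollectB]
  | cons line rest ih =>
    simp only [List.foldl_cons, pvCollectB]
    by_cases h1 : (line == "++") = true
    · simp only [if_pos h1]
      exact ih p n true
    · simp only [if_neg h1]
      by_cases h2 : (line == "--") = true
      · simp only [if_pos h2]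
        exact ih p n false
      · simp only [if_neg h2]
        cases cur with
        | true =>
          simpa [List.append_assoc] using ih (p ++ [line]) n true
        | false =>
          rw [PySem.List.foldl_append_singleton, replace_eq_expand]
          have H := ih p (n ++ (pvExpandB line.toList).map String.ofList) false
          exact ⟨H.1, H.2.trans (List.append_assoc _ _ _)⟩

theorem splitlines_go_ne_nil (isB : Char → Bool) (s cur : List Char) (acc : List (List Char)) :
    s ≠ [] ∨ cur ≠ [] ∨ acc ≠ [] → PySem.Chars.splitlines.go isB s cur acc ≠ [] := by
  fun_induction PySem.Chars.splitlines.go isB s cur acc with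
  | case1 cur acc hcur =>
    intro h
    rcases h with h | h | h
    · exact absurd rfl h
    · exact absurd (List.isEmpty_iff.mp hcur) h
    · simpa using h
  | case2 cur acc hcur => intro _; simp
  | case3 rest cur acc ih => intro _; exact ih (by simp)
  | case4 c rest cur acc hx hb ih => intro _; exact ih (by simp)
  | case5 c rest cur acc hx hb ih => intro _; exact ih (by simp)

theorem splitlines_ne_nil (s : String) (h : s ≠ "") : PySem.Str.splitlines s ≠ [] := by
  simp only [PySem.Str.splitlines, ne_eq, List.map_eq_nil_iff, PySem.Chars.splitlines]
  apply splitlines_go_ne_nil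
  exact Or.inl (by simpa using h)

-- ===== VERDICT (by name: the statement is the Claim_ definition above) =====
theorem read_benchmark_spec : Claim_equal_read_benchmark := by
  intro content _ hpre
  unfold Spec_read_benchmark read_benchmark read_benchmark_alt
  cases h : PySem.Str.splitlines content with
  | nil => exact absurd h (splitlines_ne_nil content hpre)
  | cons name rest =>
    simp only []
    have := loop_eq_collect rest [] [] true
    simp only [List.nil_append] at this
    exact Prod.ext rfl (Prod.ext this.1 this.2)
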